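-- pv_equiv track=rewrite | github.com/WoosungMichael/Algorithm | Programmers/Python/Level_1/mockTest.py | solution
-- ===== SOURCE A (Python) =====
-- def solution(answers):
--     answer = []
--
--     a1 = [1, 2, 3, 4, 5]
--     a2 = [2, 1, 2, 3, 2, 4, 2, 5]
--     a3 = [3, 3, 1, 1, 2, 2, 4, 4, 5, 5]
--     cnt = [0, 0, 0]
--     for i in range(len(answers)):
--         if a1[i % 5] == answers[i]:
--             cnt[0] += 1
--         if a2[i % 8] == answers[i]:
--             cnt[1] += 1
--         if a3[i % 10] == answers[i]:
--             cnt[2] += 1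
--
--     max_cnt = max(cnt)
--     for i in range(len(cnt)):
--         if cnt[i] == max_cnt:
--             answer.append(i + 1)
--
--     return answer
-- ===== SOURCE B (Python) =====
-- def solution(answers):
--     # Histogram approach: the three patterns all repeat with period dividing 40,
--     # so one pass builds a table keyed by (position mod 40, given answer); each
--     # pattern's score is then read off as 40 table lookups, no rescan of answers.
--     hist = {}
--     for i, a in enumerate(answers):
--         key = (i % 40, a)
--         hist[key] = hist.get(key, 0) + 1
--     pats = [[1, 2, 3, 4, 5],
--             [2, 1, 2, 3, 2, 4, 2, 5],
--             [3, 3, 1, 1, 2, 2, 4, 4, 5, 5]]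
--     scores = [sum(hist.get((r, pat[r % len(pat)]), 0) for r in range(40))
--               for pat in pats]
--     best = max(scores)
--     return [k + 1 for k, s in enumerate(scores) if s == best]
-- ===== Notes on version B (the rewrite author's own statement) =====
-- stated objective: alternative
-- what changed: A compares every answer against all three cyclic patterns in one interleaved loop; B builds a histogram dict keyed by (index mod 40, answer) in a single pass and then reads each pattern's score off as 40 dictionary lookups (the patterns' periods 5, 8, 10 all divide 40), so the answer list is scanned once and never compared to a pattern element directly.
import Mathlib
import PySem

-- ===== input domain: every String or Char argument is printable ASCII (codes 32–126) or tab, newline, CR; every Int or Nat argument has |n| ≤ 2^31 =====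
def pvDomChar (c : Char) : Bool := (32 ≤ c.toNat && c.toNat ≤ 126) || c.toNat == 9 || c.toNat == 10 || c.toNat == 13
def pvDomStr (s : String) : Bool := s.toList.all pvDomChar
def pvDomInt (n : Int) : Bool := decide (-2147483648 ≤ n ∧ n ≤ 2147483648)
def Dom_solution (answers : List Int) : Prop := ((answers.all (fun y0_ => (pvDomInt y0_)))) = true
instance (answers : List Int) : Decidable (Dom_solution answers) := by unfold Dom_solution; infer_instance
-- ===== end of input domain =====

-- B replaces A's interleaved per-pattern comparison loop with a single histogram pass
-- keyed by (index mod 40, answer) plus 40 dictionary lookups per pattern; objective: alternative.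


-- ===== PORT A =====
-- the loop 'for i in range(len(answers)): if aK[i % len(aK)] == answers[i]: cnt[K] += 1'
-- ported as structural recursion over the remaining suffix, carrying the loop index i and
-- the triple cnt (the list index aK[i % …] is always in range, so getD is exact here)
def loopA (a1 a2 a3 : List Int) : Nat → List Int → Int × Int × Int → Int × Int × Int
  | _, [], c => c
  | i, x :: rest, (c0, c1, c2) =>
      loopA a1 a2 a3 (i + 1) rest
        ((if a1.getD (i % 5) 0 = x then c0 + 1 else c0),
         (if a2.getD (i % 8) 0 = x then c1 + 1 else c1),
         (if a3.getD (i % 10) 0 = x then c2 + 1 else c2))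

def solution (answers : List Int) : List Int :=
  let a1 : List Int := [1, 2, 3, 4, 5]
  let a2 : List Int := [2, 1, 2, 3, 2, 4, 2, 5]
  let a3 : List Int := [3, 3, 1, 1, 2, 2, 4, 4, 5, 5]
  let c := loopA a1 a2 a3 0 answers (0, 0, 0)
  let cnt : List Int := [c.1, c.2.1, c.2.2]
  -- max(cnt): cnt is nonempty, so getD is exact
  let maxCnt := (PySem.List.max? cnt (fun x => x)).getD 0
  (PySem.List.pyRange 0 3 1).foldl
    (fun ans i => if PySem.List.pyGetD cnt i 0 = maxCnt then ans ++ [i + 1] else ans) []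

-- ===== PORT B =====
-- 'for i, a in enumerate(answers): key = (i % 40, a); hist[key] = hist.get(key, 0) + 1'
def histB (answers : List Int) : PySem.Dict (Int × Int) Int :=
  (PySem.List.enumerate answers 0).foldl
    (fun d p => d.insert (PySem.Int.mod p.1 40, p.2)
                  (d.getD (PySem.Int.mod p.1 40, p.2) 0 + 1)) PySem.Dict.empty

-- 'sum(hist.get((r, pat[r % len(pat)]), 0) for r in range(40))'
-- (the index r % len(pat) is always in range, so pyGetD is exact here)
def scoreB (hist : PySem.Dict (Int × Int) Int) (pat : List Int) : Int :=
  (PySem.List.pyRange 0 40 1).foldl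
    (fun s r => s + hist.getD (r, PySem.List.pyGetD pat (PySem.Int.mod r (pat.length : Int)) 0) 0) 0

def solution_alt (answers : List Int) : List Int :=
  let hist := histB answers
  let pats : List (List Int) :=
    [[1, 2, 3, 4, 5], [2, 1, 2, 3, 2, 4, 2, 5], [3, 3, 1, 1, 2, 2, 4, 4, 5, 5]]
  let scores := pats.map (scoreB hist)
  let best := (PySem.List.max? scores (fun x => x)).getD 0
  ((PySem.List.enumerate scores 0).filter (fun p => p.2 = best)).map (fun p => p.1 + 1)

-- ===== PRECONDITION & SPEC =====
def Spec_solution (answers : List Int) (out : List Int) : Prop := out = solution_alt answers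
instance (answers : List Int) (out : List Int) : Decidable (Spec_solution answers out) := by unfold Spec_solution; infer_instance

-- ===== CLAIM (what is proved, stated in full; the proofs are below) =====
def Claim_equal_solution : Prop := ∀ (answers : List Int), Dom_solution answers → Spec_solution answers (solution answers)

-- ===== LEMMAS AND PROOFS =====

-- the per-pattern direct count (proof vehicle: number of i with pat[i % len] == answers[i])
def cntA (pat : List Int) : Nat → List Int → Int
  | _, [] => 0
  | i, a :: rest =>
      (if pat.getD (i % pat.length) 0 = a then 1 else 0) + cntA pat (i + 1) rest

-- A's interleaved loop computes exactly the three independent pattern counts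
theorem loopA_eq_cnts (a1 a2 a3 : List Int) (h1 : a1.length = 5) (h2 : a2.length = 8)
    (h3 : a3.length = 10) :
    ∀ (l : List Int) (i : Nat) (c0 c1 c2 : Int),
      loopA a1 a2 a3 i l (c0, c1, c2) =
        (c0 + cntA a1 i l, c1 + cntA a2 i l, c2 + cntA a3 i l) := by
  intro l
  induction l with
  | nil => intro i c0 c1 c2; simp [loopA, cntA]
  | cons x rest ih =>
      intro i c0 c1 c2
      simp only [loopA, cntA, ih, h1, h2, h3]
      split_ifs <;> simp [add_assoc]

-- the list of histogram keys contributed by 'answers' starting at index s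
def keyList (l : List Int) (s : Int) : List (Int × Int) :=
  (PySem.List.enumerate l s).map (fun p => (PySem.Int.mod p.1 40, p.2))

-- the counting fold over pairs increments exactly the bucket of each key
theorem getD_fold_counter (l : List (Int × Int)) :
    ∀ (d : PySem.Dict (Int × Int) Int) (k : Int × Int),
      (l.foldl (fun d p => d.insert (PySem.Int.mod p.1 40, p.2)
          (d.getD (PySem.Int.mod p.1 40, p.2) 0 + 1)) d).getD k 0
        = d.getD k 0 + ((l.map (fun p => (PySem.Int.mod p.1 40, p.2))).count k : Int) := by
  induction l with
  | nil => intro d k; simp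
  | cons p rest ih =>
      intro d k
      simp only [List.foldl_cons, List.map_cons, ih, PySem.Dict.getD_insert,
        List.count_cons, beq_iff_eq]
      by_cases hk : k = (PySem.Int.mod p.1 40, p.2)
      · rw [if_pos hk, if_pos hk.symm, hk]; push_cast; ring
      · rw [if_neg hk, if_neg (fun h => hk h.symm)]; push_cast; ring

theorem histB_getD (answers : List Int) (k : Int × Int) :
    (histB answers).getD k 0 = ((keyList answers 0).count k : Int) := by
  unfold histB keyList
  rw [getD_fold_counter]
  simp

theorem sum_map_add (l : List Int) (f g : Int → Int) :
    (l.map (fun r => f r + g r)).sum = (l.map f).sum + (l.map g).sum := by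
  induction l with
  | nil => simp
  | cons x rest ih => simp [ih]; ring

theorem ind_sum_not_mem (f : Int → Int) (m a : Int) (rlist : List Int) (h : m ∉ rlist) :
    (rlist.map (fun r => if m = r ∧ a = f r then (1 : Int) else 0)).sum = 0 := by
  induction rlist with
  | nil => simp
  | cons x rest ih =>
      have hx : x ≠ m := fun he => h (he ▸ List.mem_cons_self)
      simp only [List.map_cons, List.sum_cons]
      rw [if_neg (fun hc => hx hc.1.symm)]
      simpa using ih (fun hm => h (List.mem_cons_of_mem _ hm))

theorem ind_sum_mem (f : Int → Int) (m a : Int) (rlist : List Int)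
    (hnd : rlist.Nodup) (hm : m ∈ rlist) :
    (rlist.map (fun r => if m = r ∧ a = f r then (1 : Int) else 0)).sum =
      if a = f m then 1 else 0 := by
  induction rlist with
  | nil => simp at hm
  | cons x rest ih =>
      rcases List.mem_cons.mp hm with he | hmem
      · subst he
        have hnot : m ∉ rest := (List.nodup_cons.mp hnd).1
        simp only [List.map_cons, List.sum_cons, ind_sum_not_mem f m a rest hnot, add_zero]
        simp
      · have hx : x ≠ m := fun he => (List.nodup_cons.mp hnd).1 (he ▸ hmem)
        simp only [List.map_cons, List.sum_cons]
        rw [if_neg (fun hc => hx hc.1.symm)]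
        simpa using ih (List.nodup_cons.mp hnd).2 hmem

-- the sum of the 40 histogram-bucket counts equals the direct per-pattern count
theorem sum_buckets_eq_cntA (pat : List Int) (hdvd : pat.length ∣ 40) :
    ∀ (l : List Int) (i : Nat),
      ((PySem.List.pyRange 0 40 1).map (fun r =>
          (((keyList l (i : Int)).count
            (r, PySem.List.pyGetD pat (PySem.Int.mod r (pat.length : Int)) 0) : Nat) : Int))).sum
        = cntA pat i l := by
  intro l
  induction l with
  | nil => intro i; simp [keyList, PySem.List.enumerate_nil, cntA]
  | cons a rest ih =>
      intro i
      have hkey : keyList (a :: rest) (i : Int)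
          = (((i % 40 : Nat) : Int), a) :: keyList rest (((i + 1 : Nat)) : Int) := by
        simp [keyList, PySem.List.enumerate_cons]
      rw [hkey]
      have hsplit : ∀ r : Int,
          ((((((i % 40 : Nat) : Int), a) :: keyList rest (((i + 1 : Nat)) : Int)).count
              (r, PySem.List.pyGetD pat (PySem.Int.mod r (pat.length : Int)) 0) : Int))
            = (((keyList rest (((i + 1 : Nat)) : Int)).count
                (r, PySem.List.pyGetD pat (PySem.Int.mod r (pat.length : Int)) 0) : Nat) : Int)
              + (if (i : Int) % 40 = r
                    ∧ a = PySem.List.pyGetD pat (PySem.Int.mod r (pat.length : Int)) 0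
                 then 1 else 0) := by
        intro r
        rw [List.count_cons]
        push_cast
        simp only [beq_iff_eq, Prod.mk.injEq]
      simp only [hsplit]
      rw [sum_map_add, ih (i + 1)]
      rw [ind_sum_mem (fun r => PySem.List.pyGetD pat (PySem.Int.mod r (pat.length : Int)) 0)
            ((i : Int) % 40) a (PySem.List.pyRange 0 40 1)
            (PySem.List.nodup_pyRange_one 0 40)
            (by rw [PySem.List.mem_pyRange_one]
                exact ⟨Int.emod_nonneg _ (by norm_num), Int.emod_lt_of_pos _ (by norm_num)⟩)]
      have hpvm : PySem.List.pyGetD pat (PySem.Int.mod ((i : Int) % 40) (pat.length : Int)) 0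
          = pat.getD (i % pat.length) 0 := by
        have h40 : ((i : Int) % 40) = ((i % 40 : Nat) : Int) := by push_cast; ring
        rw [h40, PySem.Int.mod_natCast, Nat.mod_mod_of_dvd i hdvd, PySem.List.pyGetD_natCast]
      rw [hpvm]
      simp only [cntA]
      by_cases hca : pat.getD (i % pat.length) 0 = a
      · rw [if_pos hca.symm, if_pos hca]; ring
      · rw [if_neg (fun h => hca h.symm), if_neg hca]; ring

-- B's per-pattern score equals the direct per-pattern count
theorem scoreB_eq_cntA (pat : List Int) (answers : List Int) (hdvd : pat.length ∣ 40) :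
    scoreB (histB answers) pat = cntA pat 0 answers := by
  unfold scoreB
  rw [PySem.List.foldl_add]
  simp only [histB_getD]
  have h := sum_buckets_eq_cntA pat hdvd answers 0
  simpa using h

-- the two winner-collection phases agree on any three scores
theorem winners_eq (s1 s2 s3 m : Int) :
    (PySem.List.pyRange 0 3 1).foldl
      (fun ans i => if PySem.List.pyGetD [s1, s2, s3] i 0 = m then ans ++ [i + 1] else ans) [] =
    ((PySem.List.enumerate [s1, s2, s3] 0).filter (fun p => p.2 = m)).map (fun p => p.1 + 1) := by
  have hr : PySem.List.pyRange 0 3 1 = [0, 1, 2] := by decide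
  rw [hr]
  simp only [List.foldl, PySem.List.enumerate_cons, PySem.List.enumerate_nil, List.filter,
    PySem.List.pyGetD, PySem.List.pyGet?, PySem.List.pyIdx?]
  norm_num
  split_ifs <;> simp_all

theorem solution_eq_alt (answers : List Int) : solution answers = solution_alt answers := by
  have hA := loopA_eq_cnts [1, 2, 3, 4, 5] [2, 1, 2, 3, 2, 4, 2, 5]
    [3, 3, 1, 1, 2, 2, 4, 4, 5, 5] (by decide) (by decide) (by decide) answers 0 0 0 0
  have h1 := scoreB_eq_cntA [1, 2, 3, 4, 5] answers (by decide)
  have h2 := scoreB_eq_cntA [2, 1, 2, 3, 2, 4, 2, 5] answers (by decide)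
  have h3 := scoreB_eq_cntA [3, 3, 1, 1, 2, 2, 4, 4, 5, 5] answers (by decide)
  simp only [solution, solution_alt, hA, List.map_cons, List.map_nil, h1, h2, h3, zero_add]
  exact winners_eq _ _ _ _

-- ===== VERDICT (by name: the statement is the Claim_ definition above) =====
theorem solution_spec : Claim_equal_solution := by
  intro answers _
  unfold Spec_solution
  exact solution_eq_alt answers
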